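-- pv_equiv track=rewrite | github.com/JaredFA363/Linknet-SchoolProject | saltingalgo.py | salt_password
-- ===== SOURCE A (Python) =====
-- def salt_password(password):
--     # for every 2 characters, insert 'Win'
--     iterations = 0
--     password_array = []
--     for char in password:
--         iterations += 1
--         password_array.append(char)
--         if iterations % 2 == 0:
--             password_array.append('Win')
--
--     return ''.join(password_array)
-- ===== SOURCE B (Python) =====
-- def salt_password(password):
--     # Stride-of-two loop: consume a full pair plus 'Win' per step,
--     # then append the (possibly empty) remainder.
--     parts = []
--     i = 0
--     n = len(password)
--     while n - i >= 2:
--         parts.append(password[i:i+2] + 'Win')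
--         i += 2
--     parts.append(password[i:])
--     return ''.join(parts)
-- ===== Notes on version B (the rewrite author's own statement) =====
-- stated objective: alternative
-- what changed: Replaced the per-character loop with a modulo-2 iteration counter by a stride-of-two loop that consumes a full pair plus 'Win' per step and appends the remainder once; the counter and the per-character branch disappear.
import Mathlib
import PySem

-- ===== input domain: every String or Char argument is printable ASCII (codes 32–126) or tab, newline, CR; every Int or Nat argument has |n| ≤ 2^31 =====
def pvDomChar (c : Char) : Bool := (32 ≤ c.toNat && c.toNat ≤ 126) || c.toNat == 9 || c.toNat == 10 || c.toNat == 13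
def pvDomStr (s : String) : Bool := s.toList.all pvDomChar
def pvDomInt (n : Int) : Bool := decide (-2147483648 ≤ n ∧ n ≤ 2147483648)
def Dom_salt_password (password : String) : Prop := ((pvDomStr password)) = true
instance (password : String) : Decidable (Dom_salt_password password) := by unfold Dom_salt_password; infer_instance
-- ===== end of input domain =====

-- B replaces A's per-character loop with a modulo-2 counter by a stride-of-two
-- loop (pair + 'Win' per step, remainder appended once): a different decomposition.

-- ===== PORT A =====
-- per-character loop: counter, append char, append 'Win' when counter is even
def salt_password (password : String) : String :=
  PySem.Str.join ""
    (password.toList.foldl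
      (fun (st : Int × List String) char =>
        let iterations := st.1 + 1
        let arr := st.2 ++ [String.singleton char]
        if PySem.Int.mod iterations 2 = 0 then (iterations, arr ++ ["Win"]) else (iterations, arr))
      (0, [])).2

-- ===== PORT B =====
-- while n - i >= 2: append password[i:i+2] + 'Win', i += 2; finally append password[i:]
-- (recursion on the not-yet-consumed suffix password[i:])
def saltAltGo : List Char → List String
  | c1 :: c2 :: rest => (String.ofList [c1, c2] ++ "Win") :: saltAltGo rest
  | s => [String.ofList s]

def salt_password_alt (password : String) : String :=
  PySem.Str.join "" (saltAltGo password.toList)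

-- ===== PRECONDITION & SPEC =====
def Spec_salt_password (password : String) (out : String) : Prop := out = salt_password_alt password
instance (password : String) (out : String) : Decidable (Spec_salt_password password out) := by unfold Spec_salt_password; infer_instance

-- ===== CLAIM (what is proved, stated in full; the proofs are below) =====
def Claim_equal_salt_password : Prop := ∀ (password : String), Dom_salt_password password → Spec_salt_password password (salt_password password)

-- ===== LEMMAS AND PROOFS =====

lemma pyMod_two (a : Int) : PySem.Int.mod a 2 = a % 2 := by
  simp [PySem.Int.mod, Int.fmod_eq_emod]

-- A's accumulated list of pieces, written as a pair-at-a-time function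
def saltParts : List Char → List String
  | c1 :: c2 :: rest => String.singleton c1 :: String.singleton c2 :: "Win" :: saltParts rest
  | s => s.map String.singleton

lemma saltA_foldl (l : List Char) : ∀ (it : Int) (arr : List String), it % 2 = 0 →
    (l.foldl
      (fun (st : Int × List String) char =>
        let iterations := st.1 + 1
        let arr := st.2 ++ [String.singleton char]
        if PySem.Int.mod iterations 2 = 0 then (iterations, arr ++ ["Win"]) else (iterations, arr))
      (it, arr)).2 = arr ++ saltParts l := by
  induction l using saltParts.induct with
  | case1 c1 c2 rest ih =>
      intro it arr h
      have h1 : ¬ PySem.Int.mod (it + 1) 2 = 0 := by rw [pyMod_two]; omega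
      have h2 : PySem.Int.mod (it + 1 + 1) 2 = 0 := by rw [pyMod_two]; omega
      simp only [List.foldl_cons]
      rw [if_neg h1, if_pos h2, ih (it + 1 + 1) _ (by rw [pyMod_two] at h2; omega)]
      simp [saltParts]
  | case2 s hne =>
      intro it arr h
      match s, hne with
      | [], _ => simp [saltParts]
      | [c], _ =>
          have h1 : ¬ PySem.Int.mod (it + 1) 2 = 0 := by rw [pyMod_two]; omega
          simp only [List.foldl_cons, List.foldl_nil]
          rw [if_neg h1]
          simp [saltParts]
      | c1 :: c2 :: rest, hne => exact (hne c1 c2 rest rfl).elim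

-- join with empty separator is flatten
lemma join_nil_flatten (ps : List (List Char)) : PySem.Chars.join [] ps = ps.flatten := by
  induction ps with
  | nil => simp [PySem.Chars.join_nil]
  | cons a tl ih =>
      cases tl with
      | nil => simp [PySem.Chars.join_singleton]
      | cons b tl' =>
          rw [PySem.Chars.join_cons_cons]
          simp only [List.flatten_cons] at ih ⊢
          rw [ih]; simp

-- both piece lists flatten to the same characters
lemma parts_flatten (l : List Char) :
    ((saltParts l).map String.toList).flatten = ((saltAltGo l).map String.toList).flatten := by
  induction l using saltAltGo.induct with
  | case1 c1 c2 rest ih =>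
      simp only [saltParts, saltAltGo, List.map_cons, List.flatten_cons, ih]
      simp
  | case2 s hne =>
      match s, hne with
      | [], _ => simp [saltParts, saltAltGo]
      | [c], _ => simp [saltParts, saltAltGo]
      | c1 :: c2 :: rest, hne => exact (hne c1 c2 rest rfl).elim

-- ===== VERDICT (by name: the statement is the Claim_ definition above) =====
theorem salt_password_spec : Claim_equal_salt_password := by
  intro password _
  unfold Spec_salt_password salt_password salt_password_alt
  apply String.toList_inj.mp
  rw [saltA_foldl _ 0 [] (by omega)]
  simp only [List.nil_append, PySem.Str.toList_join, String.toList_empty,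
    join_nil_flatten, parts_flatten]
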